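-- pv_equiv track=rewrite | github.com/suuppon/AlgorithmPS | 백준/Gold/5430. AC/AC.py | process
-- ===== SOURCE A (Python) =====
-- from collections import deque
--
-- def process(p, arr):
--     dq = deque(arr)
--     reversed_flag = False
--
--     for cmd in p:
--         if cmd == 'R':
--             reversed_flag = not reversed_flag
--         elif cmd == 'D':
--             if not dq:
--                 return 'error'
--             if reversed_flag:
--                 dq.pop()
--             else:
--                 dq.popleft()
--
--     if reversed_flag:
--         dq = reversed(dq)
--
--     return '[' + ','.join(map(str, dq)) + ']'
-- ===== SOURCE B (Python) =====
-- def process(p, arr):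
--     # One total pass tallying deletions per end (front/back) and the R-parity;
--     # 'error' iff total deletions exceed len(arr) (deque size only ever shrinks by 1 per D).
--     front = back = 0
--     rev = False
--     for c in p:
--         if c == 'R':
--             rev = not rev
--         elif c == 'D':
--             if rev:
--                 back += 1
--             else:
--                 front += 1
--     if front + back > len(arr):
--         return 'error'
--     window = arr[front:len(arr) - back]
--     if rev:
--         window = window[::-1]
--     return '[' + ','.join(map(str, window)) + ']'
-- ===== Notes on version B (the rewrite author's own statement) =====
-- stated objective: alternative
-- what changed: Replaces A's mutated deque and early 'error' return with a single total tally pass (front/back deletion counters plus R-parity); 'error' is decided once afterwards by comparing the total D-count with len(arr), and the surviving window is one slice of the untouched input.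
import Mathlib
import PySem

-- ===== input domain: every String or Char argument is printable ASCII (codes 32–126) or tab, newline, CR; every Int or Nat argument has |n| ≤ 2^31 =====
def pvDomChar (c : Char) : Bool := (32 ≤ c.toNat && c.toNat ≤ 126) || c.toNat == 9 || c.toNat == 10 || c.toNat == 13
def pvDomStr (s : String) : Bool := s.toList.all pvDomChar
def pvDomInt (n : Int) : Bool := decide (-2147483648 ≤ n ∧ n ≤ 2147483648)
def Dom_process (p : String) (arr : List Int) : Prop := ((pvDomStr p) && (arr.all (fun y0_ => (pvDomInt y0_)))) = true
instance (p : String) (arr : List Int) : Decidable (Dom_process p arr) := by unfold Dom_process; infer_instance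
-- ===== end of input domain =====

-- B replaces A's mutated deque and early return with one total tally pass (front/back deletion counters + R-parity) and a single final slice; same output, proved equal.


-- ===== PORT A =====
-- the for-loop over p: state is the deque and the flag; 'return error' = none
def processLoop (cs : List Char) (dq : List Int) (f : Bool) : Option (List Int × Bool) :=
  match cs with
  | [] => some (dq, f)
  | c :: rest =>
    if c = 'R' then processLoop rest dq (!f)
    else if c = 'D' then
      if dq.isEmpty then none
      else if f then processLoop rest dq.dropLast f
      else processLoop rest dq.tail f
    else processLoop rest dq f

def process (p : String) (arr : List Int) : String :=
  match processLoop p.toList arr false with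
  | none => "error"
  | some (dq, f) =>
    let dq' := if f then dq.reverse else dq
    "[" ++ PySem.Str.join "," (dq'.map PySem.Int.toStr) ++ "]"

-- ===== PORT B =====
-- B's loop is a total fold: state (front, back, rev), no early exit
def tallyStep (s : Nat × Nat × Bool) (c : Char) : Nat × Nat × Bool :=
  if c = 'R' then (s.1, s.2.1, !s.2.2)
  else if c = 'D' then
    (if s.2.2 then (s.1, s.2.1 + 1, s.2.2) else (s.1 + 1, s.2.1, s.2.2))
  else s

def process_alt (p : String) (arr : List Int) : String :=
  let s := p.toList.foldl tallyStep (0, 0, false)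
  if arr.length < s.1 + s.2.1 then "error"
  else
    let window := PySem.List.slice arr (some (s.1 : Int)) (some ((arr.length : Int) - (s.2.1 : Int)))
    let window' := if s.2.2 then window.reverse else window
    "[" ++ PySem.Str.join "," (window'.map PySem.Int.toStr) ++ "]"

-- ===== PRECONDITION & SPEC =====
def Spec_process (p : String) (arr : List Int) (out : String) : Prop := out = process_alt p arr
instance (p : String) (arr : List Int) (out : String) : Decidable (Spec_process p arr out) := by unfold Spec_process; infer_instance

-- ===== CLAIM (what is proved, stated in full; the proofs are below) =====
def Claim_equal_process : Prop := ∀ (p : String) (arr : List Int), Dom_process p arr → Spec_process p arr (process p arr)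

-- ===== LEMMAS AND PROOFS =====

-- step-unfolding equations for both loops (proof-side helpers)
theorem processLoop_R (rest : List Char) (dq : List Int) (f : Bool) :
    processLoop ('R' :: rest) dq f = processLoop rest dq (!f) := by
  simp [processLoop]

theorem processLoop_D (rest : List Char) (dq : List Int) (f : Bool) :
    processLoop ('D' :: rest) dq f =
      (if dq.isEmpty then none
       else if f then processLoop rest dq.dropLast f else processLoop rest dq.tail f) := by
  simp [processLoop]

theorem processLoop_other {c : Char} (hR : c ≠ 'R') (hD : c ≠ 'D')
    (rest : List Char) (dq : List Int) (f : Bool) :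
    processLoop (c :: rest) dq f = processLoop rest dq f := by
  simp [processLoop, hR, hD]

theorem tally_cons_R (rest : List Char) (a b : Nat) (f : Bool) :
    (('R' :: rest).foldl tallyStep (a, b, f)) = rest.foldl tallyStep (a, b, !f) := by
  simp [tallyStep]

theorem tally_cons_D (rest : List Char) (a b : Nat) (f : Bool) :
    (('D' :: rest).foldl tallyStep (a, b, f))
      = rest.foldl tallyStep (if f then (a, b + 1, f) else (a + 1, b, f)) := by
  cases f <;> simp [tallyStep]

theorem tally_cons_other {c : Char} (hR : c ≠ 'R') (hD : c ≠ 'D')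
    (rest : List Char) (a b : Nat) (f : Bool) :
    ((c :: rest).foldl tallyStep (a, b, f)) = rest.foldl tallyStep (a, b, f) := by
  simp [tallyStep, hR, hD]

-- the counters only grow along the fold
theorem tally_mono : ∀ (cs : List Char) (a b : Nat) (f : Bool),
    a + b ≤ (cs.foldl tallyStep (a, b, f)).1 + (cs.foldl tallyStep (a, b, f)).2.1 := by
  intro cs
  induction cs with
  | nil => intro a b f; simp
  | cons c rest ih =>
    intro a b f
    simp only [List.foldl_cons, tallyStep]
    split_ifs with h1 h2 h3
    · exact ih a b (!f)
    · have := ih a (b + 1) f; omega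
    · have := ih (a + 1) b f; omega
    · exact ih a b f

-- A's deque after deletions (a from the front, b from the back) is (xs.take (n-b)).drop a;
-- the loop relates to B's fold: some exactly when the final counters fit in n
theorem loop_fold (xs : List Int) : ∀ (cs : List Char) (a b : Nat) (f : Bool),
    a + b ≤ xs.length →
    processLoop cs ((xs.take (xs.length - b)).drop a) f =
      (if (cs.foldl tallyStep (a, b, f)).1 + (cs.foldl tallyStep (a, b, f)).2.1 ≤ xs.length
       then some ((xs.take (xs.length - (cs.foldl tallyStep (a, b, f)).2.1)).drop
                    (cs.foldl tallyStep (a, b, f)).1, (cs.foldl tallyStep (a, b, f)).2.2)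
       else none) := by
  intro cs
  induction cs with
  | nil =>
    intro a b f h
    simp only [processLoop, List.foldl_nil]
    rw [if_pos h]
  | cons c rest ih =>
    intro a b f h
    by_cases hR : c = 'R'
    · subst hR
      rw [processLoop_R, tally_cons_R]
      exact ih a b (!f) h
    · by_cases hD : c = 'D'
      · subst hD
        rw [processLoop_D, tally_cons_D]
        have hlen : ((xs.take (xs.length - b)).drop a).length = xs.length - b - a := by
          rw [List.length_drop, List.length_take]; omega
        by_cases hemp : a + b = xs.length
        · have he : ((xs.take (xs.length - b)).drop a).isEmpty = true := by
            rw [List.isEmpty_iff_length_eq_zero, hlen]; omega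
          rw [he, if_pos rfl]
          cases f with
          | false =>
            have hmono := tally_mono rest (a + 1) b false
            rw [if_neg Bool.false_ne_true,
              if_neg (by omega : ¬ ((rest.foldl tallyStep (a + 1, b, false)).1 + (rest.foldl tallyStep (a + 1, b, false)).2.1 ≤ xs.length))]
          | true =>
            have hmono := tally_mono rest a (b + 1) true
            rw [if_pos rfl,
              if_neg (by omega : ¬ ((rest.foldl tallyStep (a, b + 1, true)).1 + (rest.foldl tallyStep (a, b + 1, true)).2.1 ≤ xs.length))]
        · have he : ((xs.take (xs.length - b)).drop a).isEmpty = false := by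
            rw [List.isEmpty_eq_false_iff, ← List.length_pos_iff, hlen]; omega
          rw [he, if_neg Bool.false_ne_true]
          cases f with
          | true =>
            have hdl : ((xs.take (xs.length - b)).drop a).dropLast
                = (xs.take (xs.length - (b + 1))).drop a := by
              rw [List.dropLast_eq_take, hlen, List.take_drop, List.take_take]
              congr 2
              omega
            rw [if_pos rfl, if_pos rfl, hdl]
            exact ih a (b + 1) true (by omega)
          | false =>
            have htl : ((xs.take (xs.length - b)).drop a).tail
                = (xs.take (xs.length - b)).drop (a + 1) := by
              rw [List.tail_drop]
            rw [if_neg Bool.false_ne_true, if_neg Bool.false_ne_true, htl]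
            exact ih (a + 1) b false (by omega)
      · rw [processLoop_other hR hD, tally_cons_other hR hD]
        exact ih a b f h

-- ===== VERDICT (by name: the statement is the Claim_ definition above) =====
theorem process_spec : Claim_equal_process := by
  intro p arr _
  unfold Spec_process process process_alt
  have h := loop_fold arr p.toList 0 0 (f := false) (by omega)
  simp only [Nat.sub_zero, List.take_length, List.drop_zero] at h
  rw [h]
  set s := p.toList.foldl tallyStep (0, 0, false) with hs
  by_cases hle : s.1 + s.2.1 ≤ arr.length
  · rw [if_pos hle]
    rw [if_neg (by omega)]
    have hb : s.2.1 ≤ arr.length := by omega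
    have hslice : PySem.List.slice arr (some (s.1 : Int)) (some ((arr.length : Int) - (s.2.1 : Int)))
        = (arr.take (arr.length - s.2.1)).drop s.1 := by
      have hcast : ((arr.length : Int) - (s.2.1 : Int)) = ((arr.length - s.2.1 : Nat) : Int) := by
        omega
      rw [hcast, PySem.List.slice_natCast, List.drop_take]
    rw [hslice]
  · rw [if_neg hle, if_pos (by omega)]
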